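-- pv_equiv track=rewrite | github.com/muhdfahadali/AI-System-Project | Vacume-Cleaner/findPlan.py | reducePlan
-- ===== SOURCE A (Python) =====
-- def reducePlan(plan):
--
--     i = 0
--     while i < len(plan) - 2:
--         if plan[i] == 'R' and plan[i + 1] == 'R' and plan[i + 2] == 'R':
--             plan[i:i + 3] = ['L']
--             i += 1
--         else:
--             i += 1
--     return plan
-- ===== SOURCE B (Python) =====
-- def reducePlan(plan):
--     # Single pass over run lengths: each maximal run of n 'R's collapses to
--     # n//3 'L's followed by n%3 'R's; other elements are kept as-is.
--     # Mutates plan in place like A and returns the same object.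
--     result = []
--     count = 0
--     for m in plan:
--         if m == 'R':
--             count += 1
--         else:
--             result.extend(['L'] * (count // 3))
--             result.extend(['R'] * (count % 3))
--             result.append(m)
--             count = 0
--     result.extend(['L'] * (count // 3))
--     result.extend(['R'] * (count % 3))
--     plan[:] = result
--     return plan
-- ===== Notes on version B (the rewrite author's own statement) =====
-- stated objective: alternative
-- what changed: Replaces A's index-driven while loop with repeated in-place slice assignments by a single pass over the list that tracks the length of the current run of 'R's and flushes each run as count//3 'L's followed by count%3 'R's.
import Mathlib
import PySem

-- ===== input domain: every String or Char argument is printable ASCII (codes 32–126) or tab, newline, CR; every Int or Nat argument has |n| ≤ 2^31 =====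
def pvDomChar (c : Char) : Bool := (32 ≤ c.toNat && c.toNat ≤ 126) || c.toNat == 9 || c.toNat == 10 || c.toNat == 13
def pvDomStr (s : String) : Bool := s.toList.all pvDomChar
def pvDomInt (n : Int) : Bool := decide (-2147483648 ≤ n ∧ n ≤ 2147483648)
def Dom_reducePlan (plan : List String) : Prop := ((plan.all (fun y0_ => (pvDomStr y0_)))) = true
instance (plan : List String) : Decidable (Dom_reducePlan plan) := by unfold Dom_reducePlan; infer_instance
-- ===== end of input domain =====

-- B replaces A's repeated in-place slice surgery with one pass over runs of 'R'
-- (each run of n 'R's becomes n//3 'L's then n%3 'R's); objective: alternative.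
-- A mutates its argument in place; the equivalence proved here is about the return value only
-- (the Python B performs the same in-place replacement via plan[:] = result).

-- ===== PORT A =====
-- while i < len(plan) - 2: check plan[i..i+2] == R,R,R; slice-assign ['L']; i += 1
def reducePlanLoop (plan : List String) (i : Nat) : List String :=
  if h : i + 2 < plan.length then
    if plan.getD i "" = "R" ∧ plan.getD (i+1) "" = "R" ∧ plan.getD (i+2) "" = "R" then
      reducePlanLoop (plan.take i ++ ["L"] ++ plan.drop (i+3)) (i+1)
    else
      reducePlanLoop plan (i+1)
  else plan
termination_by plan.length - i
decreasing_by
  · simp [List.length_take, List.length_drop]; omega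
  · omega

def reducePlan (plan : List String) : List String := reducePlanLoop plan 0

-- ===== PORT B =====
-- flush of a run counter: count//3 'L's then count%3 'R's
def flushRun (c : Nat) : List String :=
  List.replicate (c / 3) "L" ++ List.replicate (c % 3) "R"

-- one pass keeping the length of the current run of 'R's
def reducePlanAltLoop : List String → Nat → List String
  | [], c => flushRun c
  | m :: rest, c =>
      if m = "R" then reducePlanAltLoop rest (c + 1)
      else flushRun c ++ m :: reducePlanAltLoop rest 0

def reducePlan_alt (plan : List String) : List String := reducePlanAltLoop plan 0

-- ===== PRECONDITION & SPEC =====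
def Spec_reducePlan (plan : List String) (out : List String) : Prop := out = reducePlan_alt plan
instance (plan : List String) (out : List String) : Decidable (Spec_reducePlan plan out) := by unfold Spec_reducePlan; infer_instance

-- ===== CLAIM (what is proved, stated in full; the proofs are below) =====
def Claim_equal_reducePlan : Prop := ∀ (plan : List String), Dom_reducePlan plan → Spec_reducePlan plan (reducePlan plan)

-- ===== LEMMAS AND PROOFS =====

-- canonical greedy triple-collapse, the common characterisation of both ports
def gRed : List String → List String
  | a :: b :: c :: t =>
      if a = "R" ∧ b = "R" ∧ c = "R" then "L" :: gRed t
      else a :: gRed (b :: c :: t)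
  | l => l
termination_by l => l.length

theorem gRed_short (l : List String) (h : l.length ≤ 2) : gRed l = l := by
  match l with
  | [] => simp [gRed]
  | [a] => simp [gRed]
  | [a, b] => simp [gRed]
  | a :: b :: c :: t => simp at h

theorem flushRun_succ3 (c : Nat) : flushRun (c + 3) = "L" :: flushRun c := by
  unfold flushRun
  rw [Nat.add_div_right _ (by norm_num), Nat.add_mod_right, List.replicate_succ]
  simp

theorem gRed_repl_nil : ∀ c, gRed (List.replicate c "R") = flushRun c
  | 0 => by simp [gRed, flushRun]
  | 1 => by simp [gRed, flushRun]
  | 2 => by simp [gRed, flushRun]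
  | (c + 3) => by
      have : List.replicate (c + 3) "R" = "R" :: "R" :: "R" :: List.replicate c "R" := by
        simp [List.replicate_succ]
      rw [this, flushRun_succ3]
      rw [show gRed ("R" :: "R" :: "R" :: List.replicate c "R")
            = "L" :: gRed (List.replicate c "R") by simp [gRed]]
      rw [gRed_repl_nil c]

theorem gRed_repl_cons : ∀ (c : Nat) (x : String) (t : List String), x ≠ "R" →
    gRed (List.replicate c "R" ++ x :: t) = flushRun c ++ x :: gRed t
  | 0, x, t, hx => by
      match t with
      | [] => simp [gRed, flushRun]
      | [y] => simp [gRed, flushRun]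
      | y :: z :: t' => simp [gRed, hx, flushRun]
  | 1, x, t, hx => by
      match t with
      | [] => simp [gRed, flushRun]
      | y :: t' =>
        have ih := gRed_repl_cons 0 x (y :: t') hx
        simp [flushRun] at ih ⊢
        simp [gRed, hx, ih]
  | 2, x, t, hx => by
      have ih := gRed_repl_cons 1 x t hx
      simp [flushRun] at ih ⊢
      simp [gRed, hx, ih]
  | (c + 3), x, t, hx => by
      have ih := gRed_repl_cons c x t hx
      have : List.replicate (c + 3) "R" ++ x :: t
          = "R" :: "R" :: "R" :: (List.replicate c "R" ++ x :: t) := by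
        simp [List.replicate_succ]
      rw [this, flushRun_succ3]
      rw [show gRed ("R" :: "R" :: "R" :: (List.replicate c "R" ++ x :: t))
            = "L" :: gRed (List.replicate c "R" ++ x :: t) by simp [gRed]]
      rw [ih]; rfl

theorem altLoop_gRed : ∀ (xs : List String) (c : Nat),
    reducePlanAltLoop xs c = gRed (List.replicate c "R" ++ xs)
  | [], c => by simp [reducePlanAltLoop, gRed_repl_nil]
  | x :: t, c => by
      by_cases hx : x = "R"
      · subst hx
        rw [show reducePlanAltLoop ("R" :: t) c = reducePlanAltLoop t (c + 1) by
              simp [reducePlanAltLoop]]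
        rw [altLoop_gRed t (c + 1)]
        congr 1
        rw [List.replicate_succ' (n := c)]
        simp
      · rw [show reducePlanAltLoop (x :: t) c
              = flushRun c ++ x :: reducePlanAltLoop t 0 by simp [reducePlanAltLoop, hx]]
        rw [altLoop_gRed t 0, gRed_repl_cons c x t hx]
        simp

theorem getD_append_len (p r : List String) (k : Nat) :
    (p ++ r).getD (p.length + k) "" = r.getD k "" := by
  simp [List.getD, List.getElem?_append_right (by omega : p.length ≤ p.length + k)]

theorem loopA_gRed : ∀ (rest p : List String),
    reducePlanLoop (p ++ rest) p.length = p ++ gRed rest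
  | a :: b :: c :: t, p => by
      have hlen : p.length + 2 < (p ++ (a :: b :: c :: t)).length := by
        simp
      have ga : (p ++ (a :: b :: c :: t)).getD p.length "" = a := by
        have h0 := getD_append_len p (a :: b :: c :: t) 0
        simpa using h0
      have gb : (p ++ (a :: b :: c :: t)).getD (p.length + 1) "" = b := by
        have h1 := getD_append_len p (a :: b :: c :: t) 1
        simpa using h1
      have gc : (p ++ (a :: b :: c :: t)).getD (p.length + 2) "" = c := by
        have h2 := getD_append_len p (a :: b :: c :: t) 2
        simpa using h2
      rw [reducePlanLoop]
      rw [dif_pos hlen, ga, gb, gc]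
      by_cases hr : a = "R" ∧ b = "R" ∧ c = "R"
      · rw [if_pos hr]
        have htake : (p ++ (a :: b :: c :: t)).take p.length = p := by
          simp
        have hdrop : (p ++ (a :: b :: c :: t)).drop (p.length + 3) = t := by
          rw [List.drop_append]
          simp
        rw [htake, hdrop]
        have : p ++ ["L"] ++ t = (p ++ ["L"]) ++ t := by simp
        rw [this]
        have hp1 : p.length + 1 = (p ++ ["L"]).length := by simp
        rw [hp1, loopA_gRed t (p ++ ["L"])]
        obtain ⟨h1, h2, h3⟩ := hr
        subst h1; subst h2; subst h3
        rw [show gRed ("R" :: "R" :: "R" :: t) = "L" :: gRed t by simp [gRed]]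
        simp
      · rw [if_neg hr]
        have hsplit : p ++ (a :: b :: c :: t) = (p ++ [a]) ++ (b :: c :: t) := by simp
        have hp1 : p.length + 1 = (p ++ [a]).length := by simp
        rw [hp1, hsplit, loopA_gRed (b :: c :: t) (p ++ [a])]
        rw [show gRed (a :: b :: c :: t) = a :: gRed (b :: c :: t) by simp [gRed, hr]]
        simp
  | [], p => by
      rw [reducePlanLoop]
      rw [dif_neg (by simp)]
      simp [gRed]
  | [a], p => by
      rw [reducePlanLoop]
      rw [dif_neg (by simp)]
      rw [gRed_short [a] (by simp)]
  | [a, b], p => by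
      rw [reducePlanLoop]
      rw [dif_neg (by simp)]
      rw [gRed_short [a, b] (by simp)]
termination_by rest _ => rest.length

-- ===== VERDICT (by name: the statement is the Claim_ definition above) =====
theorem reducePlan_spec : Claim_equal_reducePlan := by
  intro plan _
  unfold Spec_reducePlan reducePlan reducePlan_alt
  have hA := loopA_gRed plan []
  simp at hA
  rw [hA, altLoop_gRed plan 0]
  simp
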